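-- pv_equiv track=rewrite | github.com/binchuanyao/PackingAlgorithm | packingAlgorithm.py | clear_newsite
-- ===== SOURCE A (Python) =====
-- def clear_newsite(O_items):
--     '''
--     清除多余的放置点，即每个轴线及平面上只可能存在一个放置点，第一象限内可存在多个放置点
--     :param O_items: 原始放置点
--     :return: 清除覆盖点后的放置点
--     '''
--     # 3条轴线上的点
--     X_axis = [i for i in O_items if i[0] == 0 and i[1] != 0 and i[2] != 0]
--     Y_axis = [i for i in O_items if i[0] != 0 and i[1] == 0 and i[2] != 0]
--     Z_axis = [i for i in O_items if i[0] != 0 and i[1] != 0 and i[2] == 0]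
--
--     # 3个平面上的点
--     XOY = [i for i in O_items if i[0] == 0 and i[1] == 0 and i[2] != 0]
--     XOZ = [i for i in O_items if i[0] == 0 and i[1] != 0 and i[2] == 0]
--     YOZ = [i for i in O_items if i[0] != 0 and i[1] == 0 and i[2] == 0]
--
--     # 其他象限中的点
--     other = [i for i in O_items if i[0] != 0 and i[1] != 0 and i[2] != 0]
--
--     # 轴线及平面上的点
--     current = [XOY, YOZ, XOZ, X_axis, Y_axis, Z_axis]
--
--     new_O_items = []
--     for axis in current:
--         if len(axis)>0:  # 列表不为空时才取最大值
--             new_O_items.append(get_max_point(axis))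
--
--     for point in other:
--         new_O_items.append(point)
--
--     return new_O_items
--
-- def get_max_point(matrix):
--     '''
--     得到矩阵中每一列最大的值
--     '''
--     res_list=[]
--     for j in range(3):
--         one_list=[]
--         for i in range(len(matrix)):
--             one_list.append(matrix[i][j])
--         res_list.append(max(one_list))
--     return tuple(res_list)
-- ===== SOURCE B (Python) =====
-- def clear_newsite(O_items):
--     # One pass: six running column-wise maxima keyed by which coordinates are zero,
--     # plus the first-quadrant points collected in input order.
--     xoy = yoz = xoz = xa = ya = za = None
--     others = []
--     for p in O_items:
--         zx, zy, zz = p[0] == 0, p[1] == 0, p[2] == 0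
--         if not (zx or zy or zz):
--             others.append(p)
--         elif zx and zy and zz:
--             pass  # the origin is silently dropped
--         elif zx and zy:
--             xoy = _merge(xoy, p)
--         elif zy and zz:
--             yoz = _merge(yoz, p)
--         elif zx and zz:
--             xoz = _merge(xoz, p)
--         elif zx:
--             xa = _merge(xa, p)
--         elif zy:
--             ya = _merge(ya, p)
--         else:
--             za = _merge(za, p)
--     return [q for q in (xoy, yoz, xoz, xa, ya, za) if q is not None] + others
--
-- def _merge(acc, p):
--     if acc is None:
--         return p
--     return (max(acc[0], p[0]), max(acc[1], p[1]), max(acc[2], p[2]))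
-- ===== Notes on version B (the rewrite author's own statement) =====
-- stated objective: alternative
-- what changed: Replaces seven filtering passes plus a per-bucket column-max reduction with a single traversal that classifies each point by its zero-coordinate pattern and maintains six running component-wise maxima plus an in-order list of first-quadrant points.
import Mathlib
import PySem

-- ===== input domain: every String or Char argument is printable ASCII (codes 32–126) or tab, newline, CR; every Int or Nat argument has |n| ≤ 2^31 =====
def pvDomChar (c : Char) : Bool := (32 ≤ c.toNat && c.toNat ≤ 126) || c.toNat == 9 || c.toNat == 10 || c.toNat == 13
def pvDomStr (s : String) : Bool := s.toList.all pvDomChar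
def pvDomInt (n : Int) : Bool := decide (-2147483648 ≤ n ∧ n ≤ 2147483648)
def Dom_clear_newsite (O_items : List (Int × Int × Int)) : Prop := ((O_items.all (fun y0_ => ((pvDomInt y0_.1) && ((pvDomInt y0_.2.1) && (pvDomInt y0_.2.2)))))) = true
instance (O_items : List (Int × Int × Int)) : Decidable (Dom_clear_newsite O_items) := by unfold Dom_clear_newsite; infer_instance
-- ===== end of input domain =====

-- B replaces A's seven filtering passes + per-bucket column-max reduction by ONE pass keeping
-- six running component-wise maxima (keyed by the zero-coordinate pattern) and an others list
-- (objective: alternative decomposition, same asymptotic cost).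

-- ===== PORT A =====
-- get_max_point: column-wise max; Python's max([]) raises but A only calls it on nonempty
-- lists, so the `getD 0` default is never reached on A's calls.
def get_max_point (matrix : List (Int × Int × Int)) : Int × Int × Int :=
  let res_list := (PySem.List.pyRange 0 3 1).map (fun j =>
    ((matrix.map (fun p => if j = 0 then p.1 else if j = 1 then p.2.1 else p.2.2)).max?).getD 0)
  (res_list.getD 0 0, res_list.getD 1 0, res_list.getD 2 0)

def clear_newsite (O_items : List (Int × Int × Int)) : List (Int × Int × Int) :=
  let X_axis := O_items.filter (fun i => i.1 == 0 && !(i.2.1 == 0) && !(i.2.2 == 0))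
  let Y_axis := O_items.filter (fun i => !(i.1 == 0) && i.2.1 == 0 && !(i.2.2 == 0))
  let Z_axis := O_items.filter (fun i => !(i.1 == 0) && !(i.2.1 == 0) && i.2.2 == 0)
  let XOY := O_items.filter (fun i => i.1 == 0 && i.2.1 == 0 && !(i.2.2 == 0))
  let XOZ := O_items.filter (fun i => i.1 == 0 && !(i.2.1 == 0) && i.2.2 == 0)
  let YOZ := O_items.filter (fun i => !(i.1 == 0) && i.2.1 == 0 && i.2.2 == 0)
  let other := O_items.filter (fun i => !(i.1 == 0) && !(i.2.1 == 0) && !(i.2.2 == 0))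
  let current := [XOY, YOZ, XOZ, X_axis, Y_axis, Z_axis]
  let new_O_items := current.foldl (fun acc axis =>
    if axis.length > 0 then acc ++ [get_max_point axis] else acc) []
  other.foldl (fun acc point => acc ++ [point]) new_O_items

-- ===== PORT B =====
def pmerge (acc : Option (Int × Int × Int)) (p : Int × Int × Int) : Option (Int × Int × Int) :=
  match acc with
  | none => some p
  | some q => some (max q.1 p.1, max q.2.1 p.2.1, max q.2.2 p.2.2)

structure BState where
  xoy : Option (Int × Int × Int)
  yoz : Option (Int × Int × Int)
  xoz : Option (Int × Int × Int)
  xa : Option (Int × Int × Int)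
  ya : Option (Int × Int × Int)
  za : Option (Int × Int × Int)
  others : List (Int × Int × Int)
deriving Repr, DecidableEq

def bstep (s : BState) (p : Int × Int × Int) : BState :=
  let zx := p.1 == 0
  let zy := p.2.1 == 0
  let zz := p.2.2 == 0
  if !(zx || zy || zz) then { s with others := s.others ++ [p] }
  else if zx && zy && zz then s
  else if zx && zy then { s with xoy := pmerge s.xoy p }
  else if zy && zz then { s with yoz := pmerge s.yoz p }
  else if zx && zz then { s with xoz := pmerge s.xoz p }
  else if zx then { s with xa := pmerge s.xa p }
  else if zy then { s with ya := pmerge s.ya p }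
  else { s with za := pmerge s.za p }

def clear_newsite_alt (O_items : List (Int × Int × Int)) : List (Int × Int × Int) :=
  let s := O_items.foldl bstep ⟨none, none, none, none, none, none, []⟩
  ([s.xoy, s.yoz, s.xoz, s.xa, s.ya, s.za].filterMap id) ++ s.others

-- ===== PRECONDITION & SPEC =====
def Spec_clear_newsite (O_items : List (Int × Int × Int)) (out : List (Int × Int × Int)) : Prop := out = clear_newsite_alt O_items
instance (O_items : List (Int × Int × Int)) (out : List (Int × Int × Int)) : Decidable (Spec_clear_newsite O_items out) := by unfold Spec_clear_newsite; infer_instance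

-- ===== CLAIM (what is proved, stated in full; the proofs are below) =====
def Claim_equal_clear_newsite : Prop := ∀ (O_items : List (Int × Int × Int)), Dom_clear_newsite O_items → Spec_clear_newsite O_items (clear_newsite O_items)

-- ===== LEMMAS AND PROOFS =====

-- the seven zero-pattern predicates (A's filter lambdas)
def cXOY (i : Int × Int × Int) : Bool := i.1 == 0 && i.2.1 == 0 && !(i.2.2 == 0)
def cYOZ (i : Int × Int × Int) : Bool := !(i.1 == 0) && i.2.1 == 0 && i.2.2 == 0
def cXOZ (i : Int × Int × Int) : Bool := i.1 == 0 && !(i.2.1 == 0) && i.2.2 == 0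
def cXa (i : Int × Int × Int) : Bool := i.1 == 0 && !(i.2.1 == 0) && !(i.2.2 == 0)
def cYa (i : Int × Int × Int) : Bool := !(i.1 == 0) && i.2.1 == 0 && !(i.2.2 == 0)
def cZa (i : Int × Int × Int) : Bool := !(i.1 == 0) && !(i.2.1 == 0) && i.2.2 == 0
def cOther (i : Int × Int × Int) : Bool := !(i.1 == 0) && !(i.2.1 == 0) && !(i.2.2 == 0)

def cmax (q p : Int × Int × Int) : Int × Int × Int := (max q.1 p.1, max q.2.1 p.2.1, max q.2.2 p.2.2)

def gfold (c : Int × Int × Int → Bool) (a : Option (Int × Int × Int)) (l : List (Int × Int × Int)) : Option (Int × Int × Int) :=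
  l.foldl (fun a p => if c p then pmerge a p else a) a

lemma bstep_eq (s : BState) (p : Int × Int × Int) :
    bstep s p = ⟨if cXOY p then pmerge s.xoy p else s.xoy,
                 if cYOZ p then pmerge s.yoz p else s.yoz,
                 if cXOZ p then pmerge s.xoz p else s.xoz,
                 if cXa p then pmerge s.xa p else s.xa,
                 if cYa p then pmerge s.ya p else s.ya,
                 if cZa p then pmerge s.za p else s.za,
                 if cOther p then s.others ++ [p] else s.others⟩ := by
  obtain ⟨x, y, z⟩ := p
  by_cases hx : x = 0 <;> by_cases hy : y = 0 <;> by_cases hz : z = 0 <;>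
    simp [bstep, cXOY, cYOZ, cXOZ, cXa, cYa, cZa, cOther, hx, hy, hz]

lemma bfold (l : List (Int × Int × Int)) (s : BState) :
    l.foldl bstep s = ⟨gfold cXOY s.xoy l, gfold cYOZ s.yoz l, gfold cXOZ s.xoz l,
                       gfold cXa s.xa l, gfold cYa s.ya l, gfold cZa s.za l,
                       s.others ++ l.filter cOther⟩ := by
  induction l generalizing s with
  | nil => simp [gfold]
  | cons p l ih =>
    rw [List.foldl_cons, ih, bstep_eq]
    simp only [gfold, List.foldl_cons, List.filter_cons]
    by_cases h : cOther p = true <;> simp [h]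

lemma gfold_filter (c : Int × Int × Int → Bool) (l : List (Int × Int × Int)) (a : Option (Int × Int × Int)) :
    gfold c a l = (l.filter c).foldl pmerge a := by
  induction l generalizing a with
  | nil => rfl
  | cons p l ih =>
    simp only [gfold, List.foldl_cons, List.filter_cons] at *
    by_cases h : c p = true <;> simp [h, ih]

lemma foldl_pmerge_some (l : List (Int × Int × Int)) (q : Int × Int × Int) :
    l.foldl pmerge (some q) = some (l.foldl cmax q) := by
  induction l generalizing q with
  | nil => rfl
  | cons p l ih => simp [pmerge, cmax, ih]

lemma foldl_cmax_components (l : List (Int × Int × Int)) (q : Int × Int × Int) :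
    l.foldl cmax q = (l.foldl (fun a p => max a p.1) q.1,
                      l.foldl (fun a p => max a p.2.1) q.2.1,
                      l.foldl (fun a p => max a p.2.2) q.2.2) := by
  induction l generalizing q with
  | nil => rfl
  | cons p l ih => simp [cmax, ih]

lemma get_max_point_cons (q : Int × Int × Int) (l : List (Int × Int × Int)) :
    get_max_point (q :: l) = l.foldl cmax q := by
  have hr : PySem.List.pyRange 0 3 1 = [0, 1, 2] := by decide
  simp only [get_max_point, hr, List.map_cons, List.map_nil, List.max?, List.foldl_map,
    List.getD, List.getElem?_cons_zero, List.getElem?_cons_succ, Option.getD_some]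
  rw [foldl_cmax_components]
  norm_num

-- per-bucket: A's "append the column max if nonempty" = B's accumulator's toList
lemma bucket_eq (c : Int × Int × Int → Bool) (l : List (Int × Int × Int)) :
    (if (l.filter c).length > 0 then [get_max_point (l.filter c)] else []) =
      (gfold c none l).toList := by
  rw [gfold_filter]
  cases h : l.filter c with
  | nil => simp
  | cons q m => simp [List.foldl_cons, pmerge, foldl_pmerge_some, get_max_point_cons]

lemma filterMap_id_toList (l : List (Option (Int × Int × Int))) :
    l.filterMap id = l.flatMap Option.toList := by
  induction l with
  | nil => rfl
  | cons a l ih =>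
    cases a <;> simp only [List.filterMap_cons, List.flatMap_cons, id, Option.toList] <;>
      simpa using ih

-- ===== VERDICT (by name: the statement is the Claim_ definition above) =====
theorem clear_newsite_spec : Claim_equal_clear_newsite := by
  intro l _
  show clear_newsite l = clear_newsite_alt l
  simp only [clear_newsite, clear_newsite_alt, bfold]
  rw [PySem.List.foldl_append_singleton]
  simp only [List.foldl_cons, List.foldl_nil, filterMap_id_toList,
    List.flatMap_cons, List.flatMap_nil, List.append_nil, List.nil_append]
  simp only [show (fun i : Int × Int × Int => i.1 == 0 && i.2.1 == 0 && !(i.2.2 == 0)) = cXOY from rfl,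
    show (fun i : Int × Int × Int => !(i.1 == 0) && i.2.1 == 0 && i.2.2 == 0) = cYOZ from rfl,
    show (fun i : Int × Int × Int => i.1 == 0 && !(i.2.1 == 0) && i.2.2 == 0) = cXOZ from rfl,
    show (fun i : Int × Int × Int => i.1 == 0 && !(i.2.1 == 0) && !(i.2.2 == 0)) = cXa from rfl,
    show (fun i : Int × Int × Int => !(i.1 == 0) && i.2.1 == 0 && !(i.2.2 == 0)) = cYa from rfl,
    show (fun i : Int × Int × Int => !(i.1 == 0) && !(i.2.1 == 0) && i.2.2 == 0) = cZa from rfl,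
    show (fun i : Int × Int × Int => !(i.1 == 0) && !(i.2.1 == 0) && !(i.2.2 == 0)) = cOther from rfl]
  rw [← bucket_eq cXOY, ← bucket_eq cYOZ, ← bucket_eq cXOZ,
      ← bucket_eq cXa, ← bucket_eq cYa, ← bucket_eq cZa]
  by_cases h1 : (l.filter cXOY).length > 0 <;>
  by_cases h2 : (l.filter cYOZ).length > 0 <;>
  by_cases h3 : (l.filter cXOZ).length > 0 <;>
  by_cases h4 : (l.filter cXa).length > 0 <;>
  by_cases h5 : (l.filter cYa).length > 0 <;>
  by_cases h6 : (l.filter cZa).length > 0 <;>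
  simp only [h1, h2, h3, h4, h5, h6, if_true, if_false, List.nil_append, List.append_nil,
    List.append_assoc]
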